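-- pv_equiv track=rewrite | github.com/1311-hack/GFG-POTD-Solutions | Minimum Swaps (17-09-2022).py | minimumSwaps
-- ===== SOURCE A (Python) =====
-- from typing import List
--
-- def minimumSwaps(c : List[int], v : List[int],n : int,k : int,b : int, t : int) -> int:
--     # code here
--     list1 = []
--     minSwaps = 0
--     for i in range(n):
--         a = c[i]+v[i]*t
--         if a >= b: list1.append(i)
--     list1.sort(reverse=True)
--     if len(list1) <  k: return -1
--     list1 = list1[:k]
--     for i in range(len(list1)):
--         minSwaps += (n-list1[i]-i-1)
--     return minSwaps
-- ===== SOURCE B (Python) =====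
-- from typing import List
--
-- def minimumSwaps(c : List[int], v : List[int], n : int, k : int, b : int, t : int) -> int:
--     # Single right-to-left scan: the k largest qualifying indices are the first
--     # k found from the right; cnt is each one's 0-based descending rank.
--     cnt = 0
--     minSwaps = 0
--     i = n - 1
--     while i >= 0 and cnt < k:
--         if c[i] + v[i] * t >= b:
--             minSwaps += n - i - cnt - 1
--             cnt += 1
--         i -= 1
--     return minSwaps if cnt == k else -1
-- ===== Notes on version B (the rewrite author's own statement) =====
-- stated objective: alternative
-- what changed: Replaces A's build-list / sort-descending / slice / second summing loop with one right-to-left scan that accumulates the swap count directly and stops after k qualifying indices; no intermediate list or sort.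
-- outside the precondition, e.g. on minimumSwaps([0, 0, 0], [1, 1, 0], 3, -1, 1, 1): A returns 1, B returns -1
import Mathlib
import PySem

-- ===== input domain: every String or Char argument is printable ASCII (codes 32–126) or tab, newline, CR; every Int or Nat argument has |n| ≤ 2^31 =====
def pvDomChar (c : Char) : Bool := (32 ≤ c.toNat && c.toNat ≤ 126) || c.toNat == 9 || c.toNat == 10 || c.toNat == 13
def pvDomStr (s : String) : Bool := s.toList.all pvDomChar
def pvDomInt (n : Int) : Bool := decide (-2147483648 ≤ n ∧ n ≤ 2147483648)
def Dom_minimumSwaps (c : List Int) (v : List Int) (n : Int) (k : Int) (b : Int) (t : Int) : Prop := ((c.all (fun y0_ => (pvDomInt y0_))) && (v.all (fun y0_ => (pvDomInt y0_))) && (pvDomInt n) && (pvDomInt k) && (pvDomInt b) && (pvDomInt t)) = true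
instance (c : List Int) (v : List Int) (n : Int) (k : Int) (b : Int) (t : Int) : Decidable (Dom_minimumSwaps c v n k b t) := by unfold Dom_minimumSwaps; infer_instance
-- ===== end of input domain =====

-- B replaces A's build/sort/slice/sum pipeline by a single right-to-left scan with an
-- early stop after k qualifying indices (alternative decomposition, same results).

-- ===== PORT A =====
def minimumSwaps (c : List Int) (v : List Int) (n : Int) (k : Int) (b : Int) (t : Int) : Int :=
  -- for i in range(n): a = c[i]+v[i]*t; if a >= b: list1.append(i)
  let list1 : List Int := (PySem.List.pyRange 0 n 1).foldl
    (fun acc i =>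
      let a := PySem.List.pyGetD c i 0 + PySem.List.pyGetD v i 0 * t
      if a ≥ b then acc ++ [i] else acc) []
  -- list1.sort(reverse=True)
  let list1 := PySem.List.sorted list1 (fun x => x) true
  if (list1.length : Int) < k then -1
  else
    -- list1 = list1[:k]
    let list2 := PySem.List.slice list1 none (some k)
    -- for i in range(len(list1)): minSwaps += (n-list1[i]-i-1)
    (PySem.List.pyRange 0 (list2.length : Int) 1).foldl
      (fun minSwaps i => minSwaps + (n - PySem.List.pyGetD list2 i 0 - i - 1)) 0

-- ===== PORT B =====
-- while i >= 0 and cnt < k: …   (returns the final (cnt, minSwaps))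
def minimumSwapsAltLoop (c : List Int) (v : List Int) (n : Int) (k : Int) (b : Int) (t : Int)
    (i : Int) (cnt : Int) (minSwaps : Int) : Int × Int :=
  if h : 0 ≤ i ∧ cnt < k then
    if PySem.List.pyGetD c i 0 + PySem.List.pyGetD v i 0 * t ≥ b then
      minimumSwapsAltLoop c v n k b t (i - 1) (cnt + 1) (minSwaps + (n - i - cnt - 1))
    else
      minimumSwapsAltLoop c v n k b t (i - 1) cnt minSwaps
  else (cnt, minSwaps)
termination_by (i + 1).toNat
decreasing_by all_goals omega

def minimumSwaps_alt (c : List Int) (v : List Int) (n : Int) (k : Int) (b : Int) (t : Int) : Int :=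
  let r := minimumSwapsAltLoop c v n k b t (n - 1) 0 0
  if r.1 = k then r.2 else -1

-- ===== PRECONDITION & SPEC =====
-- Pre_ excludes (a) inputs where Python A raises IndexError (n larger than a list), and
-- (b) negative k, outside the task's natural domain, where A still returns a slice-sum
-- that is an accident of Python's negative-slice semantics (see claim cites).
def Pre_minimumSwaps (c : List Int) (v : List Int) (n : Int) (k : Int) (b : Int) (t : Int) : Prop :=
  n ≤ (c.length : Int) ∧ n ≤ (v.length : Int) ∧ 0 ≤ k

instance (c : List Int) (v : List Int) (n : Int) (k : Int) (b : Int) (t : Int) : Decidable (Pre_minimumSwaps c v n k b t) := by unfold Pre_minimumSwaps; infer_instance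

def pvWitness_minimumSwaps : List Int × List Int × Int × Int × Int × Int := ([0, 1], [1, 0], 2, 1, 1, 1)

def Spec_minimumSwaps (c : List Int) (v : List Int) (n : Int) (k : Int) (b : Int) (t : Int) (out : Int) : Prop := out = minimumSwaps_alt c v n k b t
instance (c : List Int) (v : List Int) (n : Int) (k : Int) (b : Int) (t : Int) (out : Int) : Decidable (Spec_minimumSwaps c v n k b t out) := by unfold Spec_minimumSwaps; infer_instance

-- ===== CLAIM (what is proved, stated in full; the proofs are below) =====
def Claim_equal_minimumSwaps : Prop := ∀ (c : List Int) (v : List Int) (n : Int) (k : Int) (b : Int) (t : Int), Dom_minimumSwaps c v n k b t → Pre_minimumSwaps c v n k b t → Spec_minimumSwaps c v n k b t (minimumSwaps c v n k b t)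

-- ===== LEMMAS AND PROOFS =====

-- the qualification test both programs apply to an index
def pvQual (c : List Int) (v : List Int) (b : Int) (t : Int) (i : Int) : Bool :=
  decide (PySem.List.pyGetD c i 0 + PySem.List.pyGetD v i 0 * t ≥ b)

-- swap-count sum: G n l r = Σ over l with ranks r, r+1, … of (n - x - rank - 1)
def pvG (n : Int) : List Int → Int → Int
  | [], _ => 0
  | x :: xs, r => (n - x - r - 1) + pvG n xs (r + 1)

-- B's loop restricted to the qualifying elements of the scanned list
def pvLoopF (n k : Int) : List Int → Int → Int → Int × Int
  | [], cnt, ms => (cnt, ms)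
  | x :: xs, cnt, ms =>
    if cnt < k then pvLoopF n k xs (cnt + 1) (ms + (n - x - cnt - 1)) else (cnt, ms)

-- B's loop over a list of indices (before filtering)
def pvLoopL (c v : List Int) (n k b t : Int) : List Int → Int → Int → Int × Int
  | [], cnt, ms => (cnt, ms)
  | x :: xs, cnt, ms =>
    if cnt < k then
      if pvQual c v b t x then pvLoopL c v n k b t xs (cnt + 1) (ms + (n - x - cnt - 1))
      else pvLoopL c v n k b t xs cnt ms
    else (cnt, ms)

lemma pvAltLoop_eq_loopL (c v : List Int) (n k b t : Int) (i cnt ms : Int) :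
    minimumSwapsAltLoop c v n k b t i cnt ms =
      pvLoopL c v n k b t (PySem.List.pyRange i (-1) (-1)) cnt ms := by
  by_cases hi : 0 ≤ i
  · rw [PySem.List.pyRange_neg_one_cons (by omega)]
    rw [minimumSwapsAltLoop]
    by_cases hc : cnt < k
    · rw [dif_pos ⟨hi, hc⟩]
      simp only [pvLoopL, if_pos hc, pvQual, decide_eq_true_eq]
      by_cases hq : PySem.List.pyGetD c i 0 + PySem.List.pyGetD v i 0 * t ≥ b
      · rw [if_pos hq, if_pos hq, pvAltLoop_eq_loopL c v n k b t (i - 1) (cnt + 1)]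
      · rw [if_neg hq, if_neg hq, pvAltLoop_eq_loopL c v n k b t (i - 1) cnt]
    · rw [dif_neg (by omega : ¬ (0 ≤ i ∧ cnt < k))]
      simp only [pvLoopL, if_neg hc]
  · rw [PySem.List.pyRange_neg_one_eq_nil (by omega), minimumSwapsAltLoop,
      dif_neg (by omega : ¬ (0 ≤ i ∧ cnt < k))]
    rfl
termination_by (i + 1).toNat
decreasing_by all_goals omega

lemma pvLoopL_eq_loopF (c v : List Int) (n k b t : Int) (l : List Int) (cnt ms : Int) :
    pvLoopL c v n k b t l cnt ms =
      pvLoopF n k (l.filter (pvQual c v b t)) cnt ms := by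
  induction l generalizing cnt ms with
  | nil => rfl
  | cons x xs ih =>
    by_cases hc : cnt < k
    · by_cases hq : pvQual c v b t x = true
      · simp [pvLoopL, pvLoopF, hc, hq, ih]
      · simp [pvLoopL, hc, hq, ih]
    · rcases hxs : xs.filter (pvQual c v b t) with _ | _ <;>
        by_cases hq : pvQual c v b t x = true <;>
        simp [pvLoopL, pvLoopF, hc, hq, hxs]

lemma pvLoopF_spec (n k : Int) (l : List Int) (cnt ms : Int) (h : cnt ≤ k) :
    pvLoopF n k l cnt ms =
      (cnt + min (k - cnt) (l.length : Int),
       ms + pvG n (l.take (k - cnt).toNat) cnt) := by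
  induction l generalizing cnt ms with
  | nil => simp [pvLoopF, pvG]; omega
  | cons x xs ih =>
    by_cases hc : cnt < k
    · have hk1 : (k - cnt).toNat = (k - (cnt + 1)).toNat + 1 := by omega
      rw [pvLoopF, if_pos hc, ih _ _ (by omega), hk1]
      simp only [List.take_succ_cons, pvG, List.length_cons, Prod.mk.injEq]
      refine ⟨by push_cast; omega, by ring⟩
    · rw [pvLoopF, if_neg hc]
      simp only [Prod.mk.injEq]
      refine ⟨by omega, ?_⟩
      have h0 : (k - cnt).toNat = 0 := by omega
      simp [h0, pvG]

-- the ascending qualifying-index list is strictly increasing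
lemma pvFilter_pairwise (c v : List Int) (n b t : Int) :
    ((PySem.List.pyRange 0 n 1).filter (pvQual c v b t)).Pairwise (· < ·) :=
  List.Pairwise.filter _ (PySem.List.pairwise_lt_pyRange_one 0 n)

-- pvG over an appended element (used for the right-to-left induction on A's second loop)
lemma pvG_append (n : Int) (l : List Int) (x r : Int) :
    pvG n (l ++ [x]) r = pvG n l r + (n - x - (r + l.length) - 1) := by
  induction l generalizing r with
  | nil => simp [pvG]
  | cons y ys ih =>
    simp only [List.cons_append, pvG, ih, List.length_cons]
    push_cast; ring

-- A's second loop computes pvG of the sliced list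
lemma pvA_sum_loop (n : Int) (l : List Int) :
    (PySem.List.pyRange 0 (l.length : Int) 1).foldl
      (fun minSwaps i => minSwaps + (n - PySem.List.pyGetD l i 0 - i - 1)) 0
      = pvG n l 0 := by
  induction l using List.reverseRecOn with
  | nil => simp [pvG, PySem.List.pyRange_one_eq_nil]
  | append_singleton ys y ih =>
    have hlen : (((ys ++ [y]).length : Nat) : Int) = (ys.length : Int) + 1 := by simp
    rw [hlen, PySem.List.pyRange_one_succ_right (by positivity), List.foldl_append]
    have hcongr : (PySem.List.pyRange 0 (ys.length : Int) 1).foldl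
        (fun minSwaps i => minSwaps + (n - PySem.List.pyGetD (ys ++ [y]) i 0 - i - 1)) 0
        = (PySem.List.pyRange 0 (ys.length : Int) 1).foldl
        (fun minSwaps i => minSwaps + (n - PySem.List.pyGetD ys i 0 - i - 1)) 0 := by
      apply PySem.List.foldl_congr_mem
      intro acc i hi
      rw [PySem.List.mem_pyRange_one] at hi
      have hgd : PySem.List.pyGetD (ys ++ [y]) i 0 = PySem.List.pyGetD ys i 0 := by
        rw [PySem.List.pyGetD_eq_getElem _ _ hi.1 (by simp; omega),
            PySem.List.pyGetD_eq_getElem _ _ hi.1 (by omega),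
            List.getElem_append_left]
      rw [hgd]
    rw [hcongr, ih, pvG_append]
    simp only [List.foldl_cons, List.foldl_nil]
    have hlast : PySem.List.pyGetD (ys ++ [y]) ((ys.length : Nat) : Int) 0 = y := by
      rw [PySem.List.pyGetD_eq_getElem _ _ (by positivity) (by simp)]
      simp
    rw [hlast]
    ring

-- ===== VERDICT (by name: the statement is the Claim_ definition above) =====
theorem minimumSwaps_spec : Claim_equal_minimumSwaps := by
  intro c v n k b t _hdom hpre
  obtain ⟨-, -, hk⟩ := hpre
  unfold Spec_minimumSwaps
  set L := (PySem.List.pyRange 0 n 1).filter (pvQual c v b t) with hL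
  -- A's first loop builds L (the ascending qualifying-index list)
  have h1 : (PySem.List.pyRange 0 n 1).foldl
      (fun acc i =>
        if PySem.List.pyGetD c i 0 + PySem.List.pyGetD v i 0 * t ≥ b then acc ++ [i] else acc)
      [] = L := by
    rw [PySem.List.foldl_append_ite_eq_filter
      (fun i => PySem.List.pyGetD c i 0 + PySem.List.pyGetD v i 0 * t ≥ b)
      (PySem.List.pyRange 0 n 1) []]
    rfl
  -- A's sort(reverse=True) reverses L
  have h2 : PySem.List.sorted L (fun x => x) true = L.reverse := by
    apply PySem.List.sorted_rev_eq_of_perm_of_pairwise_gt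
    · exact L.reverse_perm
    · simpa [List.pairwise_reverse] using pvFilter_pairwise c v n b t
  -- B's loop in closed form
  have h3 : minimumSwapsAltLoop c v n k b t (n - 1) 0 0 =
      (min k (L.length : Int), pvG n (L.reverse.take k.toNat) 0) := by
    rw [pvAltLoop_eq_loopL, pvLoopL_eq_loopF, pvLoopF_spec _ _ _ _ _ hk]
    rw [PySem.List.pyRange_neg_one_eq_reverse]
    have e1 : (-1 : Int) + 1 = 0 := by omega
    have e2 : n - 1 + 1 = n := by omega
    rw [e1, e2, List.filter_reverse, ← hL]
    simp
  show minimumSwaps c v n k b t = minimumSwaps_alt c v n k b t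
  rw [minimumSwaps, minimumSwaps_alt]
  simp only [h1, h2, h3]
  by_cases hlen : ((L.reverse.length : Nat) : Int) < k
  · rw [if_pos hlen, if_neg (by simp at hlen ⊢; omega)]
  · rw [if_neg hlen, if_pos (by simp at hlen ⊢; omega)]
    rw [PySem.List.slice_to _ hk, pvA_sum_loop]
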